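-- pv_equiv track=rewrite | github.com/cephcyn/cornell_cs6850_triadicclosure | triadicsim.py | get_pair_mutuals
-- ===== SOURCE A (Python) =====
-- def get_pair_mutuals(G):
--     """
--     Get a list of tuple of tuple of two nodes that are not connected
--     and the number of mutual neighbors between them.
--     Does NOT include pairs with 0 mutual neighbors.
--     Sorted in descending order of mutual neighbor count.
--     Each element of the list is ((node1, node2), count)
--     """
--
--     num_nodes = len(G)
--     pair_mutuals = []
--     # check each pair of nodes
--     for i in range(num_nodes):
--         for j in range(i+1, num_nodes):
--             # ignore if they are already connected
--             if j in list(G[i]): continue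
--             if i in list(G[j]): continue
--             # count number of mutual neighbors
--             mutual_i_j = len(set(list(G[i])).intersection(set(list(G[j]))))
--             if mutual_i_j>0:
--                 pair_mutuals.append(((i,j), mutual_i_j))
--     # put them in descending order of mutual connection count
--     pair_mutuals = sorted(pair_mutuals, key=lambda x: x[1], reverse=True)
--     return pair_mutuals
-- ===== SOURCE B (Python) =====
-- def get_pair_mutuals(G):
--     """Inverted-index re-implementation: for each node i, count mutual
--     neighbors of candidate partners j>i via an occurrence index value->nodes,
--     instead of intersecting neighbor sets for every pair."""
--     n = len(G)
--     sets = [set(g) for g in G]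
--     # occurrence index: value v -> ascending list of nodes whose neighbor set contains v
--     occ = {}
--     for i in range(n):
--         for v in sets[i]:
--             occ.setdefault(v, []).append(i)
--     res = []
--     for i in range(n):
--         si = sets[i]
--         # cnt[j] = number of mutual neighbors of i and j, for j > i
--         cnt = {}
--         for v in si:
--             for j in occ[v]:
--                 if j > i:
--                     cnt[j] = cnt.get(j, 0) + 1
--         for j in sorted(cnt):
--             if j in si:
--                 continue
--             if i in sets[j]:
--                 continue
--             res.append(((i, j), cnt[j]))
--     return sorted(res, key=lambda x: x[1], reverse=True)
-- ===== Notes on version B (the rewrite author's own statement) =====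
-- stated objective: faster
-- what changed: Replaces A's O(n^2) all-pairs scan with per-pair set intersections by an inverted index (neighbor value -> list of nodes), per-source-node mutual-neighbor counters, and emitting partners in sorted key order before the final sort by count.
import Mathlib
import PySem

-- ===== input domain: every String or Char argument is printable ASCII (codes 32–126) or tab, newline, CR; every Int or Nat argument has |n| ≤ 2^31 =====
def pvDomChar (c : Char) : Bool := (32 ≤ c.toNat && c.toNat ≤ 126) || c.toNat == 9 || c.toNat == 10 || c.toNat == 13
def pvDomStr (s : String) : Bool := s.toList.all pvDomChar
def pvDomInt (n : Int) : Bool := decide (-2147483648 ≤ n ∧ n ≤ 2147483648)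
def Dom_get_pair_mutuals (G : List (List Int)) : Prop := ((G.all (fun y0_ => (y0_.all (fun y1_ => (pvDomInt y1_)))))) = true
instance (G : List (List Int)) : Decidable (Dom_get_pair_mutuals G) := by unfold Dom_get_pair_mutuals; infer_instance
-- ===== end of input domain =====

-- B replaces A's O(n^2) all-pairs set intersections by an inverted index (neighbor value -> nodes)
-- with per-node mutual counters; objective: alternative algorithm, faster on sparse graphs.

-- ===== PORT A =====
-- the double loop building pair_mutuals before the final sort
def pairMutualsList (G : List (List Int)) : List ((Int × Int) × Int) :=
  (PySem.List.pyRange 0 (G.length : Int)).foldl (fun acc i =>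
    (PySem.List.pyRange (i + 1) (G.length : Int)).foldl (fun acc j =>
      if (PySem.List.pyGetD G i []).contains j then acc
      else if (PySem.List.pyGetD G j []).contains i then acc
      else
        let mutual_i_j : Int :=
          PySem.Set.len (PySem.Set.inter (PySem.Set.ofList (PySem.List.pyGetD G i []))
            (PySem.Set.ofList (PySem.List.pyGetD G j [])))
        if 0 < mutual_i_j then acc ++ [((i, j), mutual_i_j)] else acc) acc) []

def get_pair_mutuals (G : List (List Int)) : List ((Int × Int) × Int) :=
  PySem.List.sorted (pairMutualsList G) (fun x => x.2) true

-- ===== PORT B =====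
-- sets = [set(g) for g in G]
def altSets (G : List (List Int)) : List (List Int) := G.map (fun g => PySem.Set.ofList g)

-- occ: value v -> ascending list of nodes whose neighbor set contains v
def altOcc (G : List (List Int)) : PySem.Dict Int (List Int) :=
  (PySem.List.pyRange 0 (G.length : Int)).foldl (fun d i =>
    (PySem.List.pyGetD (altSets G) i []).foldl (fun d v => d.modify v [] (fun l => l ++ [i])) d)
    PySem.Dict.empty

-- cnt for one source node i: partner j > i -> number of mutual neighbors
def altCnt (G : List (List Int)) (i : Int) : PySem.Dict Int Int :=
  (PySem.List.pyGetD (altSets G) i []).foldl (fun d v =>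
    ((altOcc G).getD v []).foldl (fun d j => if i < j then d.modify j 0 (fun c => c + 1) else d) d)
    PySem.Dict.empty

def altRes (G : List (List Int)) : List ((Int × Int) × Int) :=
  (PySem.List.pyRange 0 (G.length : Int)).foldl (fun res i =>
    (PySem.List.sorted (altCnt G i).keys (fun j => j) false).foldl (fun res j =>
      if (PySem.List.pyGetD (altSets G) i []).contains j then res
      else if (PySem.List.pyGetD (altSets G) j []).contains i then res
      else res ++ [((i, j), (altCnt G i).getD j 0)]) res) []

def get_pair_mutuals_alt (G : List (List Int)) : List ((Int × Int) × Int) :=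
  PySem.List.sorted (altRes G) (fun x => x.2) true

-- ===== PRECONDITION & SPEC =====
def Spec_get_pair_mutuals (G : List (List Int)) (out : List ((Int × Int) × Int)) : Prop := out = get_pair_mutuals_alt G
instance (G : List (List Int)) (out : List ((Int × Int) × Int)) : Decidable (Spec_get_pair_mutuals G out) := by unfold Spec_get_pair_mutuals; infer_instance

-- ===== CLAIM (what is proved, stated in full; the proofs are below) =====
def Claim_equal_get_pair_mutuals : Prop := ∀ (G : List (List Int)), Dom_get_pair_mutuals G → Spec_get_pair_mutuals G (get_pair_mutuals G)

-- ===== LEMMAS AND PROOFS =====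

-- proof-side abbreviations
def pvS (G : List (List Int)) (i : Int) : List Int := PySem.Set.ofList (PySem.List.pyGetD G i [])

def pvCmut (G : List (List Int)) (i j : Int) : Int :=
  PySem.Set.len (PySem.Set.inter (PySem.Set.ofList (PySem.List.pyGetD G i []))
    (PySem.Set.ofList (PySem.List.pyGetD G j [])))

def pvOcc (G : List (List Int)) (v : Int) : List Int :=
  (PySem.List.pyRange 0 (G.length : Int)).filter (fun i => (pvS G i).contains v)

def pvLi (G : List (List Int)) (i : Int) : List Int :=
  (pvS G i).flatMap (fun v => (pvOcc G v).filter (fun j => decide (i < j)))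

-- the common per-source-node normal form of both programs' pre-sort lists
def pvN (G : List (List Int)) (i : Int) : List ((Int × Int) × Int) :=
  ((PySem.List.pyRange (i + 1) (G.length : Int)).filter (fun j =>
      !(PySem.List.pyGetD G i []).contains j && !(PySem.List.pyGetD G j []).contains i &&
        decide (0 < pvCmut G i j))).map (fun j => ((i, j), pvCmut G i j))

lemma flatMap_ite_singleton (l : List Int) (p : Int → Bool) :
    l.flatMap (fun i => if p i then [i] else []) = l.filter p := by
  induction l with
  | nil => rfl
  | cons a t ih => by_cases h : p a <;> simp [List.flatMap_cons, h, ih]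

lemma pyRange_pairwise_lt (a b : Int) : (PySem.List.pyRange a b).Pairwise (· < ·) := by
  simp only [PySem.List.pyRange]
  norm_num
  refine List.Pairwise.map _ (fun k k' h => ?_) List.pairwise_lt_range
  omega

lemma pvS_lookup (G : List (List Int)) (i : Int) :
    PySem.List.pyGetD (altSets G) i [] = pvS G i := by
  have := PySem.List.pyGetD_map (f := fun g => PySem.Set.ofList g) (xs := G) (i := i) (d := [])
  simpa [pvS, altSets] using this

lemma contains_pvS (G : List (List Int)) (i j : Int) :
    (pvS G i).contains j = (PySem.List.pyGetD G i []).contains j := by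
  have : j ∈ pvS G i ↔ j ∈ PySem.List.pyGetD G i [] := by
    simp [pvS, PySem.Set.mem_ofList]
  cases h1 : (pvS G i).contains j <;> cases h2 : (PySem.List.pyGetD G i []).contains j <;>
    simp_all

lemma altOcc_getD (G : List (List Int)) (v : Int) : (altOcc G).getD v [] = pvOcc G v := by
  unfold altOcc
  simp only [pvS_lookup]
  have h1 : ∀ (d : PySem.Dict Int (List Int)) (i : Int),
      (pvS G i).foldl (fun d v => d.modify v [] (fun l => l ++ [i])) d
      = ((pvS G i).map (fun v => (v, i))).foldl (fun d p => d.modify p.1 [] (fun l => l ++ [p.2])) d := by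
    intro d i; rw [List.foldl_map]
  simp only [h1]
  rw [← List.foldl_flatMap]
  rw [PySem.Dict.getD_foldl_modify_append]
  simp only [List.filter_flatMap, List.map_flatMap, List.filter_map]
  have h2 : ∀ i : Int,
      List.map (fun x => x.2) (List.map (fun v' => (v', i)) (List.filter ((fun p => p.1 == v) ∘ (fun v' => (v', i))) (pvS G i)))
      = if (pvS G i).contains v then [i] else [] := by
    intro i
    rw [List.map_map]
    have : ((fun p => p.1 == v) ∘ fun v' => (v', i)) = (fun v' => v' == v) := rfl
    rw [this, List.filter_beq]
    by_cases hm : v ∈ pvS G i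
    · rw [List.count_eq_one_of_mem (by simp [pvS, PySem.Set.nodup_ofList]) hm]
      simp [hm]
    · rw [List.count_eq_zero_of_not_mem hm]
      simp [hm]
  simp only [h2]
  rw [flatMap_ite_singleton]
  simp [pvOcc, PySem.Dict.empty, PySem.Dict.getD, PySem.Dict.get?]

lemma mem_pvOcc (G : List (List Int)) (v i : Int) :
    i ∈ pvOcc G v ↔ 0 ≤ i ∧ i < (G.length : Int) ∧ v ∈ pvS G i := by
  simp [pvOcc, List.mem_filter, PySem.List.mem_pyRange_one]
  tauto

lemma pvOcc_nodup (G : List (List Int)) (v : Int) : (pvOcc G v).Nodup := by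
  have := (pyRange_pairwise_lt 0 (G.length : Int)).filter (fun i => (pvS G i).contains v)
  exact this.imp (fun h => ne_of_lt h)

lemma pvCmut_eq_countP (G : List (List Int)) (i j : Int) :
    pvCmut G i j = ((pvS G i).countP (fun v => (pvS G j).contains v) : Int) := by
  simp [pvCmut, PySem.Set.len, PySem.Set.inter, pvS, List.countP_eq_length_filter, PySem.Set.contains]

lemma pvLi_count (G : List (List Int)) (i j : Int) (hi : 0 ≤ i) (hij : i < j) :
    ((pvLi G i).count j : Int) = if j < (G.length : Int) then pvCmut G i j else 0 := by
  unfold pvLi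
  rw [List.count_flatMap]
  have h1 : ∀ v : Int, (List.count j ∘ fun v => (pvOcc G v).filter (fun j => decide (i < j))) v
      = if (decide (j < (G.length : Int)) && (pvS G j).contains v) then 1 else 0 := by
    intro v
    simp only [Function.comp]
    rw [List.count_filter (by simp [hij])]
    by_cases hm : j ∈ pvOcc G v
    · rw [List.count_eq_one_of_mem (pvOcc_nodup G v) hm]
      rw [mem_pvOcc] at hm
      simp [hm.2.1, hm.2.2]
    · rw [List.count_eq_zero_of_not_mem hm]
      rw [mem_pvOcc] at hm
      by_cases hn : j < (G.length : Int)
      · have : v ∉ pvS G j := by intro hv; exact hm ⟨by omega, hn, hv⟩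
        simp [hn, this]
      · simp [hn]
  rw [List.map_congr_left (fun v _ => h1 v)]
  by_cases hn : j < (G.length : Int)
  · simp only [hn, decide_true, Bool.true_and, if_pos]
    rw [PySem.List.sum_map_ite_one_zero_nat']
    rw [pvCmut_eq_countP]
    norm_num
  · simp [hn]

lemma mem_pvLi (G : List (List Int)) (i j : Int) (hi : 0 ≤ i) :
    j ∈ pvLi G i ↔ i < j ∧ j < (G.length : Int) ∧ 0 < pvCmut G i j := by
  unfold pvLi
  simp only [List.mem_flatMap, List.mem_filter, mem_pvOcc, decide_eq_true_eq]
  constructor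
  · rintro ⟨v, hv, ⟨h0, hn, hvj⟩, hij⟩
    refine ⟨hij, hn, ?_⟩
    rw [pvCmut_eq_countP]
    have : 0 < (pvS G i).countP (fun v => (pvS G j).contains v) := by
      rw [List.countP_pos_iff]
      exact ⟨v, hv, by simp [hvj]⟩
    exact_mod_cast this
  · rintro ⟨hij, hn, hpos⟩
    rw [pvCmut_eq_countP] at hpos
    have : 0 < (pvS G i).countP (fun v => (pvS G j).contains v) := by exact_mod_cast hpos
    rw [List.countP_pos_iff] at this
    obtain ⟨v, hv, hc⟩ := this
    exact ⟨v, hv, ⟨by omega, hn, by simpa using hc⟩, hij⟩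

lemma altCnt_eq (G : List (List Int)) (i : Int) :
    altCnt G i = (pvLi G i).foldl (fun d j => d.modify j 0 (fun c => c + 1)) PySem.Dict.empty := by
  unfold altCnt pvLi
  simp only [pvS_lookup, altOcc_getD]
  rw [List.foldl_flatMap]
  congr 1
  funext d v
  rw [List.foldl_filter]
  congr 1
  funext d j
  by_cases h : i < j <;> simp [h]

lemma altCnt_getD (G : List (List Int)) (i j : Int) :
    (altCnt G i).getD j 0 = ((pvLi G i).count j : Int) := by
  rw [altCnt_eq, PySem.Dict.getD_foldl_modify_add_one]
  simp [PySem.Dict.empty, PySem.Dict.getD, PySem.Dict.get?]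

lemma altCnt_keys (G : List (List Int)) (i : Int) :
    (altCnt G i).keys = PySem.Set.ofList (pvLi G i) := by
  rw [altCnt_eq]
  rw [PySem.Dict.keys_foldl_modify (f := fun _ _ => (fun c => c + 1))]
  simp [PySem.Set.update, PySem.Set.ofList_eq_foldl, PySem.Dict.empty, PySem.Dict.keys]

lemma sorted_altCnt_keys (G : List (List Int)) (i : Int) (hi : 0 ≤ i) :
    PySem.List.sorted (altCnt G i).keys (fun j => j) false =
      (PySem.List.pyRange (i + 1) (G.length : Int)).filter (fun j => decide (0 < pvCmut G i j)) := by
  rw [altCnt_keys]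
  apply PySem.List.sorted_eq_of_perm_of_pairwise_lt
  · rw [List.perm_ext_iff_of_nodup
      (((pyRange_pairwise_lt _ _).filter _).imp (fun h => ne_of_lt h))
      (PySem.Set.nodup_ofList _)]
    intro j
    rw [PySem.Set.mem_ofList, mem_pvLi G i j hi]
    simp only [List.mem_filter, PySem.List.mem_pyRange_one, decide_eq_true_eq]
    constructor
    · rintro ⟨⟨h1, h2⟩, h3⟩; exact ⟨by omega, h2, h3⟩
    · rintro ⟨h1, h2, h3⟩; exact ⟨⟨by omega, h2⟩, h3⟩
  · exact (pyRange_pairwise_lt _ _).filter _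

lemma pairMutualsList_eq (G : List (List Int)) :
    pairMutualsList G = (PySem.List.pyRange 0 (G.length : Int)).flatMap (pvN G) := by
  unfold pairMutualsList
  have hin : ∀ (i : Int) (acc : List ((Int × Int) × Int)),
      (PySem.List.pyRange (i + 1) (G.length : Int)).foldl (fun acc j =>
        if (PySem.List.pyGetD G i []).contains j then acc
        else if (PySem.List.pyGetD G j []).contains i then acc
        else
          let mutual_i_j : Int :=
            PySem.Set.len (PySem.Set.inter (PySem.Set.ofList (PySem.List.pyGetD G i []))
              (PySem.Set.ofList (PySem.List.pyGetD G j [])))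
          if 0 < mutual_i_j then acc ++ [((i, j), mutual_i_j)] else acc) acc
      = acc ++ pvN G i := by
    intro i acc
    have hb : ∀ (acc : List ((Int × Int) × Int)) (j : Int),
        (if (PySem.List.pyGetD G i []).contains j then acc
         else if (PySem.List.pyGetD G j []).contains i then acc
         else
           let mutual_i_j : Int :=
             PySem.Set.len (PySem.Set.inter (PySem.Set.ofList (PySem.List.pyGetD G i []))
               (PySem.Set.ofList (PySem.List.pyGetD G j [])))
           if 0 < mutual_i_j then acc ++ [((i, j), mutual_i_j)] else acc)
        = (if (!(PySem.List.pyGetD G i []).contains j && !(PySem.List.pyGetD G j []).contains i &&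
              decide (0 < pvCmut G i j)) then acc ++ [((i, j), pvCmut G i j)] else acc) := by
      intro acc j
      show _ = _
      simp only [pvCmut]
      cases h1 : (PySem.List.pyGetD G i []).contains j <;>
        cases h2 : (PySem.List.pyGetD G j []).contains i <;>
          by_cases h3 : 0 < PySem.Set.len (PySem.Set.inter (PySem.Set.ofList (PySem.List.pyGetD G i []))
            (PySem.Set.ofList (PySem.List.pyGetD G j []))) <;> simp_all
    rw [PySem.List.foldl_congr_mem _ _ _ _ (fun acc j _ => hb acc j)]
    rw [PySem.List.foldl_append_if]
    rfl
  rw [PySem.List.foldl_congr_mem _ _ _ _ (fun acc i _ => hin i acc)]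
  rw [PySem.List.foldl_append_eq_flatMap]
  rfl

lemma altRes_eq (G : List (List Int)) :
    altRes G = (PySem.List.pyRange 0 (G.length : Int)).flatMap (pvN G) := by
  unfold altRes
  have hin : ∀ (i : Int), i ∈ PySem.List.pyRange 0 (G.length : Int) →
      ∀ (res : List ((Int × Int) × Int)),
      (PySem.List.sorted (altCnt G i).keys (fun j => j) false).foldl (fun res j =>
        if (PySem.List.pyGetD (altSets G) i []).contains j then res
        else if (PySem.List.pyGetD (altSets G) j []).contains i then res
        else res ++ [((i, j), (altCnt G i).getD j 0)]) res
      = res ++ pvN G i := by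
    intro i hi res
    have hi0 : 0 ≤ i := by
      rw [PySem.List.mem_pyRange_one] at hi; exact hi.1
    rw [sorted_altCnt_keys G i hi0]
    have hb : ∀ (res : List ((Int × Int) × Int)) (j : Int),
        (if (PySem.List.pyGetD (altSets G) i []).contains j then res
         else if (PySem.List.pyGetD (altSets G) j []).contains i then res
         else res ++ [((i, j), (altCnt G i).getD j 0)])
        = (if (!(PySem.List.pyGetD G i []).contains j && !(PySem.List.pyGetD G j []).contains i)
            then res ++ [((i, j), (altCnt G i).getD j 0)] else res) := by
      intro res j
      simp only [pvS_lookup, contains_pvS]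
      cases h1 : (PySem.List.pyGetD G i []).contains j <;>
        cases h2 : (PySem.List.pyGetD G j []).contains i <;> simp
    rw [PySem.List.foldl_congr_mem _ _ _ _ (fun res j _ => hb res j)]
    rw [PySem.List.foldl_append_if]
    congr 1
    rw [List.filter_filter]
    unfold pvN
    apply List.map_congr_left
    intro j hj
    rw [List.mem_filter] at hj
    have hjr := hj.1
    rw [PySem.List.mem_pyRange_one] at hjr
    have : (altCnt G i).getD j 0 = pvCmut G i j := by
      rw [altCnt_getD, pvLi_count G i j hi0 (by omega)]
      simp [hjr.2]
    rw [this]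
  rw [PySem.List.foldl_congr_mem _ _ _ _ (fun res i hi => hin i hi res)]
  rw [PySem.List.foldl_append_eq_flatMap]
  rfl

-- ===== VERDICT (by name: the statement is the Claim_ definition above) =====
theorem get_pair_mutuals_spec : Claim_equal_get_pair_mutuals := by
  intro G _
  unfold Spec_get_pair_mutuals get_pair_mutuals get_pair_mutuals_alt
  rw [pairMutualsList_eq, altRes_eq]
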